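-- pv_equiv track=rewrite | github.com/ifthekharbyte/Stock-Information-Chatbot | stock_compare.py | select_best_search_result
-- ===== SOURCE A (Python) =====
-- def select_best_search_result(results: list[dict], query_text: str) -> dict:
--     query = query_text.strip().upper()
--     query_lower = query_text.strip().lower()
--
--     for item in results:
--         if str(item.get("ticker", "")).upper() == query:
--             return item
--
--     for item in results:
--         if str(item.get("name", "")).strip().lower() == query_lower:
--             return item
--
--     for item in results:
--         ticker = str(item.get("ticker", "")).upper()
--         name = str(item.get("name", "")).lower()
--         if query in ticker or query_lower in name:
--             return item
--
--     return results[0]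
-- ===== SOURCE B (Python) =====
-- def _tier(item, query, query_lower):
--     ticker_upper = str(item.get("ticker", "")).upper()
--     if ticker_upper == query:
--         return 1
--     if str(item.get("name", "")).strip().lower() == query_lower:
--         return 2
--     if query in ticker_upper or query_lower in str(item.get("name", "")).lower():
--         return 3
--     return None
--
--
-- def select_best_search_result(results: list[dict], query_text: str) -> dict:
--     query = query_text.strip().upper()
--     query_lower = query_text.strip().lower()
--     best_item = None
--     best_tier = 4
--     for item in results:
--         tier = _tier(item, query, query_lower)
--         if tier is not None and tier < best_tier:
--             best_item, best_tier = item, tier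
--     return best_item if best_item is not None else results[0]
-- ===== Notes on version B (the rewrite author's own statement) =====
-- stated objective: simpler
-- what changed: A's three sequential scans over results are replaced by a single pass that assigns each item a priority tier (1 ticker-exact, 2 name-exact, 3 substring) and keeps the earliest item with the globally smallest tier.
import Mathlib
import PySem

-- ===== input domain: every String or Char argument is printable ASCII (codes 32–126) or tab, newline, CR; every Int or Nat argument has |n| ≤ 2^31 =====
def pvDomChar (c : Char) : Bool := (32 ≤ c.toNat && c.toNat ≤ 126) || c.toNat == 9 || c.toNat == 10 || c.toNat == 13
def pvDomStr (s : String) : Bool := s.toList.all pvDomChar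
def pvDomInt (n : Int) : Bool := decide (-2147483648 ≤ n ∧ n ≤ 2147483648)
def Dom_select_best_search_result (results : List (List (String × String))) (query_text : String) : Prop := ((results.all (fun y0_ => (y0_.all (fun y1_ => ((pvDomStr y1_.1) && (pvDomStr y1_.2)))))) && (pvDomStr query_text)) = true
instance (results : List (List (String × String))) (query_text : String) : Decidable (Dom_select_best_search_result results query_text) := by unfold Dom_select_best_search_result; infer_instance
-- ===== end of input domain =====

-- B replaces A's three sequential scans by one pass keeping the earliest item of globally
-- smallest priority tier (simpler: a single loop instead of three).

-- ===== PORT A =====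
-- condition of A's first loop: str(item.get("ticker","")).upper() == query
def pvCond1 (query : String) (item : List (String × String)) : Bool :=
  PySem.Str.upper (PySem.Dict.getD (PySem.Dict.mk item) "ticker" "") == query
-- condition of A's second loop: str(item.get("name","")).strip().lower() == query_lower
def pvCond2 (query_lower : String) (item : List (String × String)) : Bool :=
  PySem.Str.lower (PySem.Str.strip (PySem.Dict.getD (PySem.Dict.mk item) "name" "")) == query_lower
-- condition of A's third loop: query in ticker or query_lower in name
def pvCond3 (query query_lower : String) (item : List (String × String)) : Bool :=
  PySem.Str.isIn query (PySem.Str.upper (PySem.Dict.getD (PySem.Dict.mk item) "ticker" "")) ||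
  PySem.Str.isIn query_lower (PySem.Str.lower (PySem.Dict.getD (PySem.Dict.mk item) "name" ""))

def select_best_search_result (results : List (List (String × String))) (query_text : String) : List (String × String) :=
  let query := PySem.Str.upper (PySem.Str.strip query_text)
  let query_lower := PySem.Str.lower (PySem.Str.strip query_text)
  match results.find? (pvCond1 query) with          -- first for-loop: return on first ticker-exact match
  | some item => item
  | none =>
    match results.find? (pvCond2 query_lower) with  -- second for-loop: first name-exact match
    | some item => item
    | none =>
      match results.find? (pvCond3 query query_lower) with  -- third for-loop: first substring match
      | some item => item
      | none => (PySem.List.pyGet? results 0).getD []  -- results[0]; IndexError on [] is excluded by Pre_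

-- ===== PORT B =====
-- _tier(item, query, query_lower): priority tier of an item, None if it matches nothing
def pvTier (query query_lower : String) (item : List (String × String)) : Option Nat :=
  let ticker_upper := PySem.Str.upper (PySem.Dict.getD (PySem.Dict.mk item) "ticker" "")
  if ticker_upper == query then some 1
  else if PySem.Str.lower (PySem.Str.strip (PySem.Dict.getD (PySem.Dict.mk item) "name" "")) == query_lower then some 2
  else if PySem.Str.isIn query ticker_upper ||
          PySem.Str.isIn query_lower (PySem.Str.lower (PySem.Dict.getD (PySem.Dict.mk item) "name" "")) then some 3
  else none

-- one step of B's loop: update (best_item, best_tier) when the new tier is strictly smaller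
def pvStep (query query_lower : String) (st : Option (List (String × String)) × Nat)
    (item : List (String × String)) : Option (List (String × String)) × Nat :=
  match pvTier query query_lower item with
  | some t => if t < st.2 then (some item, t) else st
  | none => st

def select_best_search_result_alt (results : List (List (String × String))) (query_text : String) : List (String × String) :=
  let query := PySem.Str.upper (PySem.Str.strip query_text)
  let query_lower := PySem.Str.lower (PySem.Str.strip query_text)
  let st := results.foldl (pvStep query query_lower) (none, 4)
  match st.1 with
  | some item => item
  | none => (PySem.List.pyGet? results 0).getD []  -- results[0]; IndexError on [] is excluded by Pre_

-- ===== PRECONDITION & SPEC =====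
-- Pre_ excludes only the empty list, on which both Pythons raise IndexError at results[0].
def Pre_select_best_search_result (results : List (List (String × String))) (query_text : String) : Prop :=
  results ≠ []
instance (results : List (List (String × String))) (query_text : String) : Decidable (Pre_select_best_search_result results query_text) := by unfold Pre_select_best_search_result; infer_instance
def pvWitness_select_best_search_result : (List (List (String × String))) × String :=
  ([[("ticker", "AAPL"), ("name", "Apple Inc")]], "aapl")

def Spec_select_best_search_result (results : List (List (String × String))) (query_text : String) (out : List (String × String)) : Prop := out = select_best_search_result_alt results query_text
instance (results : List (List (String × String))) (query_text : String) (out : List (String × String)) : Decidable (Spec_select_best_search_result results query_text out) := by unfold Spec_select_best_search_result; infer_instance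

-- ===== CLAIM (what is proved, stated in full; the proofs are below) =====
def Claim_equal_select_best_search_result : Prop := ∀ (results : List (List (String × String))) (query_text : String), Dom_select_best_search_result results query_text → Pre_select_best_search_result results query_text → Spec_select_best_search_result results query_text (select_best_search_result results query_text)

-- ===== LEMMAS AND PROOFS =====
set_option maxHeartbeats 1000000

-- B's tier function, written with A's three loop conditions
lemma tier_spec (q ql : String) (i : List (String × String)) :
    pvTier q ql i =
      (if pvCond1 q i then some 1 else
       if pvCond2 ql i then some 2 else
       if pvCond3 q ql i then some 3 else none) := rfl

lemma tier_eq_one_iff (q ql : String) (i : List (String × String)) :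
    pvTier q ql i = some 1 ↔ pvCond1 q i = true := by
  rw [tier_spec]
  rcases h1 : pvCond1 q i <;> rcases h2 : pvCond2 ql i <;> rcases h3 : pvCond3 q ql i <;> simp

lemma tier_eq_two_iff (q ql : String) (i : List (String × String)) :
    pvTier q ql i = some 2 ↔ (pvCond1 q i = false ∧ pvCond2 ql i = true) := by
  rw [tier_spec]
  rcases h1 : pvCond1 q i <;> rcases h2 : pvCond2 ql i <;> rcases h3 : pvCond3 q ql i <;> simp

lemma tier_eq_three_iff (q ql : String) (i : List (String × String)) :
    pvTier q ql i = some 3 ↔ (pvCond1 q i = false ∧ pvCond2 ql i = false ∧ pvCond3 q ql i = true) := by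
  rw [tier_spec]
  rcases h1 : pvCond1 q i <;> rcases h2 : pvCond2 ql i <;> rcases h3 : pvCond3 q ql i <;> simp

lemma tier_eq_none_iff (q ql : String) (i : List (String × String)) :
    pvTier q ql i = none ↔ (pvCond1 q i = false ∧ pvCond2 ql i = false ∧ pvCond3 q ql i = false) := by
  rw [tier_spec]
  rcases h1 : pvCond1 q i <;> rcases h2 : pvCond2 ql i <;> rcases h3 : pvCond3 q ql i <;> simp

lemma tier_cases (q ql : String) (i : List (String × String)) :
    pvTier q ql i = none ∨ pvTier q ql i = some 1 ∨ pvTier q ql i = some 2 ∨ pvTier q ql i = some 3 := by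
  rw [tier_spec]
  rcases h1 : pvCond1 q i <;> rcases h2 : pvCond2 ql i <;> rcases h3 : pvCond3 q ql i <;> simp

-- once the bound is 1 the fold state is frozen
lemma run_frozen_one (q ql : String) (l : List (List (String × String)))
    (b : Option (List (String × String))) :
    l.foldl (pvStep q ql) (b, 1) = (b, 1) := by
  induction l with
  | nil => rfl
  | cons y xs ih =>
    have h := tier_cases q ql y
    simp only [List.foldl_cons, pvStep]
    rcases h with h | h | h | h <;> simp [h, ih]

-- with no cond1 item left, a state with bound 2 is frozen
lemma run_frozen_two (q ql : String) (l : List (List (String × String)))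
    (hl : ∀ i ∈ l, pvCond1 q i = false) (b : Option (List (String × String))) :
    l.foldl (pvStep q ql) (b, 2) = (b, 2) := by
  induction l with
  | nil => rfl
  | cons y xs ih =>
    have h := tier_cases q ql y
    have h1 : pvTier q ql y ≠ some 1 := by
      rw [Ne, tier_eq_one_iff]; simp [hl y (by simp)]
    simp only [List.foldl_cons, pvStep]
    rcases h with h | h | h | h <;>
      simp_all [ih (fun i hi => hl i (by simp [hi]))]

-- with no cond1/cond2 item left, a state with bound 3 is frozen
lemma run_frozen_three (q ql : String) (l : List (List (String × String)))
    (hl : ∀ i ∈ l, pvCond1 q i = false ∧ pvCond2 ql i = false) (b : Option (List (String × String))) :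
    l.foldl (pvStep q ql) (b, 3) = (b, 3) := by
  induction l with
  | nil => rfl
  | cons y xs ih =>
    have h := tier_cases q ql y
    have h1 : pvTier q ql y ≠ some 1 := by
      rw [Ne, tier_eq_one_iff]; simp [(hl y (by simp)).1]
    have h2 : pvTier q ql y ≠ some 2 := by
      rw [Ne, tier_eq_two_iff]; simp [(hl y (by simp)).2]
    simp only [List.foldl_cons, pvStep]
    rcases h with h | h | h | h <;>
      simp_all [ih (fun i hi => hl i (by simp [hi]))]

-- if some item satisfies cond1, the fold (from any bound > 1) ends on the first such item with tier 1
lemma run_of_find1 (q ql : String) (l : List (List (String × String))) :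
    ∀ (x : List (String × String)) (st : Option (List (String × String)) × Nat),
      l.find? (pvCond1 q) = some x → 1 < st.2 →
      l.foldl (pvStep q ql) st = (some x, 1) := by
  induction l with
  | nil => intro x st hf _; simp at hf
  | cons y xs ih =>
    intro x st hf hst
    rcases hy : pvCond1 q y with _ | _
    · rw [List.find?_cons_of_neg (by simp [hy])] at hf
      have h := tier_cases q ql y
      rcases h with h | h | h | h
      · simp only [List.foldl_cons, pvStep, h]
        exact ih x st hf hst
      · exact absurd ((tier_eq_one_iff q ql y).mp h) (by simp [hy])
      · simp only [List.foldl_cons, pvStep, h]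
        split_ifs with hlt
        · exact ih x _ hf (by norm_num)
        · exact ih x st hf hst
      · simp only [List.foldl_cons, pvStep, h]
        split_ifs with hlt
        · exact ih x _ hf (by norm_num)
        · exact ih x st hf hst
    · rw [List.find?_cons_of_pos hy] at hf
      obtain rfl : _ = x := Option.some.inj hf
      have h1 : pvTier q ql y = some 1 := (tier_eq_one_iff q ql y).mpr hy
      simp only [List.foldl_cons, pvStep, h1]
      rw [if_pos hst]
      exact run_frozen_one q ql xs (some y)

-- no cond1 anywhere, some cond2: fold (from bound > 2) ends on the first cond2 item with tier 2
lemma run_of_find2 (q ql : String) (l : List (List (String × String))) :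
    ∀ (x : List (String × String)) (st : Option (List (String × String)) × Nat),
      (∀ i ∈ l, pvCond1 q i = false) →
      l.find? (pvCond2 ql) = some x → 2 < st.2 →
      l.foldl (pvStep q ql) st = (some x, 2) := by
  induction l with
  | nil => intro x st _ hf _; simp at hf
  | cons y xs ih =>
    intro x st hl hf hst
    have hy1 : pvCond1 q y = false := hl y (by simp)
    have hxs : ∀ i ∈ xs, pvCond1 q i = false := fun i hi => hl i (by simp [hi])
    rcases hy : pvCond2 ql y with _ | _
    · rw [List.find?_cons_of_neg (by simp [hy])] at hf
      have h := tier_cases q ql y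
      rcases h with h | h | h | h
      · simp only [List.foldl_cons, pvStep, h]
        exact ih x st hxs hf hst
      · exact absurd ((tier_eq_one_iff q ql y).mp h) (by simp [hy1])
      · exact absurd (((tier_eq_two_iff q ql y).mp h).2) (by simp [hy])
      · simp only [List.foldl_cons, pvStep, h]
        split_ifs with hlt
        · exact ih x _ hxs hf (by norm_num)
        · exact ih x st hxs hf hst
    · rw [List.find?_cons_of_pos hy] at hf
      obtain rfl : _ = x := Option.some.inj hf
      have h2 : pvTier q ql y = some 2 := (tier_eq_two_iff q ql y).mpr ⟨hy1, hy⟩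
      simp only [List.foldl_cons, pvStep, h2]
      rw [if_pos hst]
      exact run_frozen_two q ql xs hxs (some y)

-- no cond1/cond2 anywhere, some cond3: fold (from bound > 3) ends on the first cond3 item with tier 3
lemma run_of_find3 (q ql : String) (l : List (List (String × String))) :
    ∀ (x : List (String × String)) (st : Option (List (String × String)) × Nat),
      (∀ i ∈ l, pvCond1 q i = false ∧ pvCond2 ql i = false) →
      l.find? (pvCond3 q ql) = some x → 3 < st.2 →
      l.foldl (pvStep q ql) st = (some x, 3) := by
  induction l with
  | nil => intro x st _ hf _; simp at hf
  | cons y xs ih =>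
    intro x st hl hf hst
    have hy12 := hl y (by simp)
    have hxs : ∀ i ∈ xs, pvCond1 q i = false ∧ pvCond2 ql i = false := fun i hi => hl i (by simp [hi])
    rcases hy : pvCond3 q ql y with _ | _
    · rw [List.find?_cons_of_neg (by simp [hy])] at hf
      have hn : pvTier q ql y = none := (tier_eq_none_iff q ql y).mpr ⟨hy12.1, hy12.2, hy⟩
      simp only [List.foldl_cons, pvStep, hn]
      exact ih x st hxs hf hst
    · rw [List.find?_cons_of_pos hy] at hf
      obtain rfl : _ = x := Option.some.inj hf
      have h3 : pvTier q ql y = some 3 := (tier_eq_three_iff q ql y).mpr ⟨hy12.1, hy12.2, hy⟩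
      simp only [List.foldl_cons, pvStep, h3]
      rw [if_pos hst]
      exact run_frozen_three q ql xs hxs (some y)

-- nothing matches: the fold never changes the state
lemma run_none (q ql : String) (l : List (List (String × String)))
    (hl : ∀ i ∈ l, pvTier q ql i = none) (st : Option (List (String × String)) × Nat) :
    l.foldl (pvStep q ql) st = st := by
  induction l generalizing st with
  | nil => rfl
  | cons y xs ih =>
    simp only [List.foldl_cons, pvStep, hl y (by simp)]
    exact ih (fun i hi => hl i (by simp [hi])) st

-- ===== VERDICT (by name: the statement is the Claim_ definition above) =====
theorem select_best_search_result_spec : Claim_equal_select_best_search_result := by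
  unfold Claim_equal_select_best_search_result
  intro results query_text _hdom _hpre
  unfold Spec_select_best_search_result
  unfold select_best_search_result select_best_search_result_alt
  set q := PySem.Str.upper (PySem.Str.strip query_text) with hq
  set ql := PySem.Str.lower (PySem.Str.strip query_text) with hql
  rcases h1 : results.find? (pvCond1 q) with _ | x
  · have hn1 : ∀ i ∈ results, pvCond1 q i = false := by
      intro i hi
      simpa using List.find?_eq_none.mp h1 i hi
    rcases h2 : results.find? (pvCond2 ql) with _ | x
    · have hn2 : ∀ i ∈ results, pvCond2 ql i = false := by
        intro i hi
        simpa using List.find?_eq_none.mp h2 i hi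
      rcases h3 : results.find? (pvCond3 q ql) with _ | x
      · have hn3 : ∀ i ∈ results, pvCond3 q ql i = false := by
          intro i hi
          simpa using List.find?_eq_none.mp h3 i hi
        have hrun := run_none q ql results
          (fun i hi => (tier_eq_none_iff q ql i).mpr ⟨hn1 i hi, hn2 i hi, hn3 i hi⟩) (none, 4)
        simp [h1, h2, h3, hrun]
      · have hrun := run_of_find3 q ql results x (none, 4)
          (fun i hi => ⟨hn1 i hi, hn2 i hi⟩) h3 (by norm_num)
        simp [h1, h2, h3, hrun]
    · have hrun := run_of_find2 q ql results x (none, 4) hn1 h2 (by norm_num)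
      simp [h1, h2, hrun]
  · have hrun := run_of_find1 q ql results x (none, 4) h1 (by norm_num)
    simp [h1, hrun]
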